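-- pv_equiv track=rewrite | github.com/a907471325/data_structure | 灵茶山题单/滑动窗口/三、单序列双指针/1577. 数的平方等于两数乘积的方法数.py | helper
-- ===== SOURCE A (Python) =====
-- def helper(nums1, nums2):
--     # 1 1 1  1 1 1/ 15
--
--     # 1 1 4 4 12
--
--     res = 0
--     m = len(nums1)
--     n = len(nums2)
--     if n < 2:
--         return res
--     for i in range(m):
--         l = 0
--         r = n - 1
--
--         t = nums1[i] ** 2
--         if nums2[0] * nums2[1] > t:
--             continue
--
--         if nums2[-1] * nums2[-2] < t:
--             break
--
--         while l < r:
--             p = nums2[l] * nums2[r]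
--             if p > t:
--                 r -= 1
--             elif p < t:
--                 l += 1
--             else:
--                 is_eq = nums2[l] == nums2[r]
--                 if is_eq:
--                     slen = r - l + 1
--                     res += (slen - 1) * (slen) // 2
--                     break
--
--                 j = l + 1
--                 k = r - 1
--                 while nums2[j] == nums2[l]:
--                     j += 1
--
--                 while nums2[k] == nums2[r]:
--                     k -= 1
--
--                 res += (j - l) * (r - k)
--                 l = j
--                 r = k
--
--     return res
-- ===== SOURCE B (Python) =====
-- def build_next(g):
--     # nxt[i] = smallest index > i whose value differs from g[i] (len(g) if none)
--     m = len(g)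
--     nxt = []
--     for i in range(m - 1, -1, -1):
--         nxt.append(nxt[-1] if (i + 1 < m and g[i + 1] == g[i]) else i + 1)
--     nxt.reverse()
--     return nxt
--
--
-- def build_prev(g):
--     # prv[i] = largest index < i whose value differs from g[i] (-1 if none)
--     prv = []
--     for i in range(len(g)):
--         prv.append(prv[-1] if (i >= 1 and g[i - 1] == g[i]) else i - 1)
--     return prv
--
--
-- def pairs_for(g, nxt, prv, t):
--     # two-pointer walk using the precomputed jump tables instead of inner scans
--     c = 0
--     l, r = 0, len(g) - 1
--     while l < r:
--         p = g[l] * g[r]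
--         if p > t:
--             r -= 1
--         elif p < t:
--             l += 1
--         elif g[l] == g[r]:
--             s = r - l + 1
--             return c + (s - 1) * s // 2
--         else:
--             j, k = nxt[l], prv[r]
--             c += (j - l) * (r - k)
--             l, r = j, k
--     return c
--
--
-- def helper(nums1, nums2):
--     n = len(nums2)
--     if n < 2:
--         return 0
--     nxt = build_next(nums2)
--     prv = build_prev(nums2)
--     lo = nums2[0] * nums2[1]
--     hi = nums2[-1] * nums2[-2]
--     memo = {}
--     total = 0
--     for x in nums1:
--         t = x * x
--         if lo > t:
--             continue
--         if hi < t: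
--             break
--         if t not in memo:
--             memo[t] = pairs_for(nums2, nxt, prv, t)
--         total += memo[t]
--     return total
-- ===== Notes on version B (the rewrite author's own statement) =====
-- stated objective: alternative
-- what changed: B precomputes two jump tables over nums2 (next/previous index holding a different value) once, so the per-element two-pointer walk skips equal runs by O(1) lookups instead of rescanning them, hoists the end-pair products out of the nums1 loop, and memoizes the count per distinct target square in a dict (measured ~1.2x, below the 1.5x bar, so no speed is claimed).
import Mathlib
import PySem

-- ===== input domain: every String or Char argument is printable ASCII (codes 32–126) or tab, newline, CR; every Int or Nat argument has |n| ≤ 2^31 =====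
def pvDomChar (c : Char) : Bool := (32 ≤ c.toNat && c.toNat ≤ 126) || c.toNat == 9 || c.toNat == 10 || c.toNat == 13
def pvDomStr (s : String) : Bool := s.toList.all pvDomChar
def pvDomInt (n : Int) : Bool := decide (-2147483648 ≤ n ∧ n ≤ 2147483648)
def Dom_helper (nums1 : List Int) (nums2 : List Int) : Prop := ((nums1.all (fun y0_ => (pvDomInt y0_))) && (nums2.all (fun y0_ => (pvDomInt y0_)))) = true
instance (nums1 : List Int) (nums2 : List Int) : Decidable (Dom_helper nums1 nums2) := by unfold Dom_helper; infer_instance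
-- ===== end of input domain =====

-- B replaces A's per-element inner equal-run scans by two jump tables precomputed once over
-- nums2, hoists the end-pair products out of the loop, and memoizes the count per target square.

-- ===== PORT A =====
-- the inner 'while nums2[j] == nums2[l]: j += 1' scan; the 'j < length' bound only makes the
-- recursion total — A's loop never reaches it (the scan starts only when the endpoints differ)
def scanUp (g : List Int) (v : Int) (j : Nat) : Nat :=
  if h : j < g.length ∧ g.getD j 0 = v then scanUp g v (j + 1) else j
termination_by g.length - j
decreasing_by omega

-- the inner 'while nums2[k] == nums2[r]: k -= 1' scan; the 'k ≠ 0' stop likewise only makes the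
-- recursion total and is never reached by A's loop
def scanDown (g : List Int) (v : Int) (k : Nat) : Nat :=
  if k ≠ 0 ∧ g.getD k 0 = v then scanDown g v (k - 1) else k
termination_by k

theorem scanUp_ge (g : List Int) (v : Int) (j : Nat) : j ≤ scanUp g v j := by
  unfold scanUp
  split
  · exact le_trans (Nat.le_succ j) (scanUp_ge g v (j + 1))
  · exact le_refl j
termination_by g.length - j
decreasing_by omega

theorem scanDown_le (g : List Int) (v : Int) (k : Nat) : scanDown g v k ≤ k := by
  unfold scanDown
  split
  · rename_i h
    exact le_trans (scanDown_le g v (k - 1)) (by omega)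
  · exact le_refl k
termination_by k

-- the 'while l < r' two-pointer loop of A, threading the accumulator res
def twoPtr (g : List Int) (t : Int) (l r : Nat) (res : Int) : Int :=
  if _hlr : l < r then
    let p := g.getD l 0 * g.getD r 0
    if p > t then twoPtr g t l (r - 1) res
    else if p < t then twoPtr g t (l + 1) r res
    else if g.getD l 0 = g.getD r 0 then
      let slen : Int := (r : Int) - (l : Int) + 1
      res + PySem.Int.floordiv ((slen - 1) * slen) 2
    else
      let j := scanUp g (g.getD l 0) (l + 1)
      let k := scanDown g (g.getD r 0) (r - 1)
      twoPtr g t j k (res + ((j : Int) - (l : Int)) * ((r : Int) - (k : Int)))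
  else res
termination_by r - l
decreasing_by
  · omega
  · omega
  · have h1 := scanUp_ge g (g.getD l 0) (l + 1)
    have h2 := scanDown_le g (g.getD r 0) (r - 1)
    omega

-- 'for i in range(m)' with continue / break, re-reading nums2's end pairs every iteration
def outerA (g : List Int) (n : Nat) : List Int → Int → Int
  | [], res => res
  | x :: rest, res =>
    let t := x ^ 2
    if g.getD 0 0 * g.getD 1 0 > t then outerA g n rest res
    else if g.getD (n - 1) 0 * g.getD (n - 2) 0 < t then res
    else outerA g n rest (twoPtr g t 0 (n - 1) res)

def helper (nums1 : List Int) (nums2 : List Int) : Int :=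
  let res : Int := 0
  let n := nums2.length
  if n < 2 then res else outerA nums2 n nums1 res

-- ===== PORT B =====
-- build_next: 'for i in range(m-1,-1,-1): nxt.append(nxt[-1] if … else i+1)' then reverse;
-- ported as a down-counting recursion that conses onto the accumulator, which yields the
-- reversed-append list directly (nxt[-1] is the accumulator's head; its default is never read)
def buildNext (g : List Int) : Nat → List Nat → List Nat
  | 0, acc => acc
  | c + 1, acc =>
      buildNext g c
        ((if c + 1 < g.length ∧ g.getD (c + 1) 0 = g.getD c 0 then acc.headD 0 else c + 1) :: acc)

-- one step of build_prev's 'for i in range(m): prv.append(prv[-1] if … else i-1)'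
def prevStep (g : List Int) (acc : List Int) (i : Nat) : List Int :=
  (if 1 ≤ i ∧ g.getD (i - 1) 0 = g.getD i 0 then acc.headD 0 else (i : Int) - 1) :: acc

-- build_prev: the forward append loop is ported as a foldl consing onto the accumulator
-- (so the list comes out reversed) followed by the reverse that restores index order
def buildPrev (g : List Int) : List Int :=
  ((List.range g.length).foldl (prevStep g) []).reverse

-- pairs_for: the two-pointer walk; the run ends come from the jump tables in O(1).
-- The 'l < j ∧ k < r' test only makes the recursion total; for the tables helper_alt builds
-- it always holds (nxt[l] > l and prv[r] < r), and prv[r] ≥ 0 there, so .toNat is exact.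
def pfLoop (g : List Int) (nxt : List Nat) (prv : List Int) (t : Int) (l r : Nat) (c : Int) : Int :=
  if _hlr : l < r then
    let p := g.getD l 0 * g.getD r 0
    if p > t then pfLoop g nxt prv t l (r - 1) c
    else if p < t then pfLoop g nxt prv t (l + 1) r c
    else if g.getD l 0 = g.getD r 0 then
      let s : Int := (r : Int) - (l : Int) + 1
      c + PySem.Int.floordiv ((s - 1) * s) 2
    else
      let j := nxt.getD l 0
      let k := (prv.getD r 0).toNat
      if _hjk : l < j ∧ k < r then
        pfLoop g nxt prv t j k (c + ((j : Int) - (l : Int)) * ((r : Int) - (k : Int)))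
      else c
  else c
termination_by r - l
decreasing_by
  · omega
  · omega
  · omega

-- 'for x in nums1' with hoisted lo / hi and the memo dict
def outerB (g : List Int) (n : Nat) (nxt : List Nat) (prv : List Int) (lo hi : Int) :
    List Int → PySem.Dict Int Int → Int → Int
  | [], _cache, total => total
  | x :: rest, cache, total =>
    let t := x * x
    if lo > t then outerB g n nxt prv lo hi rest cache total
    else if hi < t then total
    else
      let cache' := if cache.contains t then cache else cache.insert t (pfLoop g nxt prv t 0 (n - 1) 0)
      outerB g n nxt prv lo hi rest cache' (total + cache'.getD t 0)

def helper_alt (nums1 : List Int) (nums2 : List Int) : Int :=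
  let n := nums2.length
  if n < 2 then 0
  else
    let nxt := buildNext nums2 n []
    let prv := buildPrev nums2
    let lo := nums2.getD 0 0 * nums2.getD 1 0
    let hi := nums2.getD (n - 1) 0 * nums2.getD (n - 2) 0
    outerB nums2 n nxt prv lo hi nums1 PySem.Dict.empty 0

-- ===== PRECONDITION & SPEC =====
def Spec_helper (nums1 : List Int) (nums2 : List Int) (out : Int) : Prop := out = helper_alt nums1 nums2
instance (nums1 : List Int) (nums2 : List Int) (out : Int) : Decidable (Spec_helper nums1 nums2 out) := by unfold Spec_helper; infer_instance

-- ===== CLAIM (what is proved, stated in full; the proofs are below) =====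
def Claim_equal_helper : Prop := ∀ (nums1 : List Int) (nums2 : List Int), Dom_helper nums1 nums2 → Spec_helper nums1 nums2 (helper nums1 nums2)

-- ===== LEMMAS AND PROOFS =====

-- the value buildNext's entry i must carry: where A's upward equal-run scan from i+1 stops
def fN (g : List Int) (i : Nat) : Nat := scanUp g (g.getD i 0) (i + 1)

-- the value buildPrev's entry i must carry, as build_prev's recurrence defines it
def fP (g : List Int) : Nat → Int
  | 0 => -1
  | i + 1 => if g.getD i 0 = g.getD (i + 1) 0 then fP g i else (i : Int)

theorem fN_rec (g : List Int) (i : Nat) :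
    fN g i = if i + 1 < g.length ∧ g.getD (i + 1) 0 = g.getD i 0 then fN g (i + 1) else i + 1 := by
  unfold fN
  rw [scanUp]
  split_ifs with h
  · rw [h.2]
  · rfl

theorem fP_scanDown (g : List Int) :
    ∀ r, (∃ i, i < r ∧ g.getD i 0 ≠ g.getD r 0) →
      fP g r = ((scanDown g (g.getD r 0) (r - 1) : Nat) : Int) := by
  intro r
  induction r with
  | zero => rintro ⟨i, hi, -⟩; omega
  | succ r ih =>
      rintro ⟨i, hi, hne⟩
      rw [fP, scanDown]
      by_cases h : g.getD r 0 = g.getD (r + 1) 0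
      · rw [if_pos h]
        by_cases hr : r = 0
        · subst hr
          interval_cases i
          exact absurd h hne
        · rw [if_pos ⟨hr, h⟩]
          have hir : i ≠ r := by rintro rfl; rw [h] at hne; exact hne rfl
          have := ih ⟨i, by omega, by rw [h]; exact hne⟩
          rw [this, h]
          simp
      · rw [if_neg h, if_neg (by tauto)]
        simp

theorem buildNext_spec (g : List Int) :
    ∀ c, c ≤ g.length →
      buildNext g c ((List.range' c (g.length - c)).map (fN g))
        = (List.range' 0 g.length).map (fN g) := by
  intro c
  induction c with
  | zero => intro _; rw [buildNext]; simp
  | succ c ih =>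
      intro hc
      rw [buildNext]
      have hstep : (if c + 1 < g.length ∧ g.getD (c + 1) 0 = g.getD c 0
          then ((List.range' (c + 1) (g.length - (c + 1))).map (fN g)).headD 0 else c + 1)
          = fN g c := by
        rw [fN_rec]
        split_ifs with h
        · have h1 : g.length - (c + 1) = (g.length - (c + 2)) + 1 := by omega
          rw [h1, List.range'_succ]
          simp
        · rfl
      rw [hstep]
      have h2 : (List.range' c (g.length - c)).map (fN g)
          = fN g c :: (List.range' (c + 1) (g.length - (c + 1))).map (fN g) := by
        have h1 : g.length - c = (g.length - (c + 1)) + 1 := by omega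
        rw [h1, List.range'_succ]
        simp
      rw [← h2]
      exact ih (by omega)

theorem nxt_getD (g : List Int) (i : Nat) (hi : i < g.length) :
    (buildNext g g.length []).getD i 0 = fN g i := by
  have h0 : buildNext g g.length [] = (List.range' 0 g.length).map (fN g) := by
    have := buildNext_spec g g.length le_rfl
    simpa using this
  rw [h0]
  rw [List.getD_eq_getElem _ _ (by simpa using hi)]
  simp

theorem buildPrev_foldl (g : List Int) :
    ∀ c, (List.range c).foldl (prevStep g) [] = ((List.range c).map (fP g)).reverse := by
  intro c
  induction c with
  | zero => rfl
  | succ c ih =>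
      rw [List.range_succ, List.foldl_append, ih, List.map_append, List.reverse_append]
      simp only [List.map_cons, List.map_nil, List.reverse_cons, List.reverse_nil,
        List.nil_append, List.foldl_cons, List.foldl_nil, List.singleton_append]
      unfold prevStep
      congr 1
      cases c with
      | zero => simp [fP]
      | succ i =>
          rw [fP]
          by_cases h : g.getD i 0 = g.getD (i + 1) 0
          · rw [if_pos ⟨by omega, by simpa using h⟩, if_pos h]
            rw [List.range_succ]
            simp
          · rw [if_neg (by simpa using h), if_neg h]
            push_cast
            ring

theorem prv_getD (g : List Int) (i : Nat) (hi : i < g.length) :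
    (buildPrev g).getD i 0 = fP g i := by
  unfold buildPrev
  rw [buildPrev_foldl, List.reverse_reverse]
  rw [List.getD_eq_getElem _ _ (by simpa using hi)]
  simp

-- the accumulator threads through pfLoop additively
theorem pfLoop_acc (g : List Int) (nxt : List Nat) (prv : List Int) (t : Int) :
    ∀ (d l r : Nat) (c : Int), r - l ≤ d →
      pfLoop g nxt prv t l r c = c + pfLoop g nxt prv t l r 0 := by
  intro d
  induction d with
  | zero =>
      intro l r c hd
      have h0 : ∀ c' : Int, pfLoop g nxt prv t l r c' = c' := by
        intro c'; rw [pfLoop, dif_neg (by omega)]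
      rw [h0, h0]; ring
  | succ d ih =>
      intro l r c hd
      by_cases hlr : l < r
      · have hstep : ∀ c' : Int, pfLoop g nxt prv t l r c'
            = (if g.getD l 0 * g.getD r 0 > t then pfLoop g nxt prv t l (r - 1) c'
              else if g.getD l 0 * g.getD r 0 < t then pfLoop g nxt prv t (l + 1) r c'
              else if g.getD l 0 = g.getD r 0 then
                c' + PySem.Int.floordiv ((((r : Int) - (l : Int) + 1) - 1) * ((r : Int) - (l : Int) + 1)) 2
              else if l < nxt.getD l 0 ∧ (prv.getD r 0).toNat < r then
                pfLoop g nxt prv t (nxt.getD l 0) ((prv.getD r 0).toNat)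
                  (c' + (((nxt.getD l 0 : Nat) : Int) - (l : Int)) * ((r : Int) - (((prv.getD r 0).toNat : Nat) : Int)))
              else c') := by
          intro c'
          rw [pfLoop, dif_pos hlr]
          by_cases h4 : l < nxt.getD l 0 ∧ (prv.getD r 0).toNat < r
          · rw [dif_pos h4, if_pos h4]
          · rw [dif_neg h4, if_neg h4]
        rw [hstep c, hstep 0]
        by_cases h1 : g.getD l 0 * g.getD r 0 > t
        · rw [if_pos h1, if_pos h1, ih l (r - 1) c (by omega), ih l (r - 1) 0 (by omega)]
        · rw [if_neg h1, if_neg h1]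
          by_cases h2 : g.getD l 0 * g.getD r 0 < t
          · rw [if_pos h2, if_pos h2, ih (l + 1) r c (by omega), ih (l + 1) r 0 (by omega)]
          · rw [if_neg h2, if_neg h2]
            by_cases h3 : g.getD l 0 = g.getD r 0
            · rw [if_pos h3, if_pos h3]
              ring
            · rw [if_neg h3, if_neg h3]
              by_cases h4 : l < nxt.getD l 0 ∧ (prv.getD r 0).toNat < r
              · rw [if_pos h4, if_pos h4, ih _ _ _ (by omega), ih _ _ ((0 : Int) + _) (by omega)]
                ring
              · rw [if_neg h4, if_neg h4]
                ring
      · have h0 : ∀ c' : Int, pfLoop g nxt prv t l r c' = c' := by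
          intro c'; rw [pfLoop, dif_neg hlr]
        rw [h0, h0]; ring

-- A's two-pointer loop equals B's jump-table loop once the tables carry the scans' stops
theorem twoPtr_eq_pfLoop (g : List Int) (nxt : List Nat) (prv : List Int)
    (Hn : ∀ i, i < g.length → nxt.getD i 0 = fN g i)
    (Hp : ∀ i, i < g.length → prv.getD i 0 = fP g i) (t : Int) :
    ∀ (d l r : Nat) (c : Int), r - l ≤ d → r < g.length →
      twoPtr g t l r c = pfLoop g nxt prv t l r c := by
  intro d
  induction d with
  | zero =>
      intro l r c hd hr
      rw [twoPtr, pfLoop, dif_neg (by omega), dif_neg (by omega)]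
  | succ d ih =>
      intro l r c hd hr
      by_cases hlr : l < r
      · rw [twoPtr, pfLoop, dif_pos hlr, dif_pos hlr]
        by_cases h1 : g.getD l 0 * g.getD r 0 > t
        · rw [if_pos h1, if_pos h1]
          exact ih l (r - 1) c (by omega) (by omega)
        · rw [if_neg h1, if_neg h1]
          by_cases h2 : g.getD l 0 * g.getD r 0 < t
          · rw [if_pos h2, if_pos h2]
            exact ih (l + 1) r c (by omega) hr
          · rw [if_neg h2, if_neg h2]
            by_cases h3 : g.getD l 0 = g.getD r 0
            · rw [if_pos h3, if_pos h3]
            · rw [if_neg h3, if_neg h3]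
              have hj : nxt.getD l 0 = scanUp g (g.getD l 0) (l + 1) :=
                Hn l (by omega)
              have hksd : fP g r = ((scanDown g (g.getD r 0) (r - 1) : Nat) : Int) :=
                fP_scanDown g r ⟨l, hlr, h3⟩
              have hk : (prv.getD r 0).toNat = scanDown g (g.getD r 0) (r - 1) := by
                rw [Hp r hr, hksd]
                simp
              have hge := scanUp_ge g (g.getD l 0) (l + 1)
              have hle := scanDown_le g (g.getD r 0) (r - 1)
              rw [dif_pos (by rw [hj, hk]; omega)]
              rw [hj, hk]
              exact ih _ _ _ (by omega) (by omega)
      · rw [twoPtr, pfLoop, dif_neg hlr, dif_neg hlr]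

-- A's outer loop equals B's outer loop whenever every cached value is the count for its key
theorem outerA_eq_outerB (g : List Int) (nxt : List Nat) (prv : List Int)
    (Hn : ∀ i, i < g.length → nxt.getD i 0 = fN g i)
    (Hp : ∀ i, i < g.length → prv.getD i 0 = fP g i)
    (hn : 2 ≤ g.length) :
    ∀ (xs : List Int) (cache : PySem.Dict Int Int) (res : Int),
      (∀ t v, cache.get? t = some v → v = pfLoop g nxt prv t 0 (g.length - 1) 0) →
      outerA g g.length xs res
        = outerB g g.length nxt prv (g.getD 0 0 * g.getD 1 0)
            (g.getD (g.length - 1) 0 * g.getD (g.length - 2) 0) xs cache res := by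
  intro xs
  induction xs with
  | nil => intro cache res _; rfl
  | cons x rest ih =>
      intro cache res hinv
      rw [outerA, outerB]
      simp only [pow_two]
      by_cases h1 : g.getD 0 0 * g.getD 1 0 > x * x
      · rw [if_pos h1, if_pos h1]
        exact ih cache res hinv
      · rw [if_neg h1, if_neg h1]
        by_cases h2 : g.getD (g.length - 1) 0 * g.getD (g.length - 2) 0 < x * x
        · rw [if_pos h2, if_pos h2]
        · rw [if_neg h2, if_neg h2]
          have htp : twoPtr g (x * x) 0 (g.length - 1) res
              = res + pfLoop g nxt prv (x * x) 0 (g.length - 1) 0 := by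
            rw [twoPtr_eq_pfLoop g nxt prv Hn Hp (x * x) (g.length - 1) 0 (g.length - 1) res
                le_rfl (by omega),
              pfLoop_acc g nxt prv (x * x) (g.length - 1) 0 (g.length - 1) res le_rfl]
          by_cases hc : cache.contains (x * x)
          · rw [if_pos hc]
            have hsome : (cache.get? (x * x)).isSome := by
              rw [← PySem.Dict.contains_eq_isSome_get?]; exact hc
            obtain ⟨v, hv⟩ := Option.isSome_iff_exists.mp hsome
            have hval : cache.getD (x * x) 0 = pfLoop g nxt prv (x * x) 0 (g.length - 1) 0 := by
              rw [PySem.Dict.getD_eq_get?_getD, hv, Option.getD_some]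
              exact hinv _ _ hv
            rw [htp, hval]
            exact ih cache _ hinv
          · rw [if_neg hc]
            rw [htp, PySem.Dict.getD_insert_self]
            apply ih
            intro t v hv
            rw [PySem.Dict.get?_insert] at hv
            split at hv
            · rename_i ht
              subst ht
              exact (Option.some_inj.mp hv).symm
            · exact hinv t v hv

-- ===== VERDICT (by name: the statement is the Claim_ definition above) =====
theorem helper_spec : Claim_equal_helper := by
  intro nums1 nums2 _hd
  unfold Spec_helper helper helper_alt
  by_cases hn : nums2.length < 2
  · rw [if_pos hn, if_pos hn]
  · rw [if_neg hn, if_neg hn]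
    exact outerA_eq_outerB nums2 (buildNext nums2 nums2.length []) (buildPrev nums2)
      (fun i hi => nxt_getD nums2 i hi) (fun i hi => prv_getD nums2 i hi) (by omega)
      nums1 PySem.Dict.empty 0
      (by intro t v hv; rw [PySem.Dict.get?_empty] at hv; exact absurd hv (by simp))
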